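-- pv_equiv track=rewrite | github.com/artometa/deepchem | deep_chem/utils/preprocess.py | scaffold_separate
-- ===== SOURCE A (Python) =====
-- def scaffold_separate(dataset):
--   """Splits provided data by compound scaffolds.
--
--   Returns a list of pairs (scaffold, [identifiers]), where each pair
--   contains a scaffold and a list of all identifiers for compounds that
--   share that scaffold. The list will be sorted in decreasing order of
--   number of compounds.
--
--   Parameters
--   ----------
--   dataset: dict
--     A dictionary of type produced by load_datasets.
--   """
--   scaffolds = {}
--   for mol_id in dataset:
--     datapoint = dataset[mol_id]
--     scaffold = datapoint["scaffold"]
--     if scaffold not in scaffolds: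
--       scaffolds[scaffold] = [mol_id]
--     else:
--       scaffolds[scaffold].append(mol_id)
--   # Sort from largest to smallest scaffold sets
--   return [elt for (scaffold, elt) in sorted(scaffolds.items(), key=lambda x: -len(x[1]))]
-- ===== SOURCE B (Python) =====
-- def scaffold_separate(dataset):
--   """Splits provided data by compound scaffolds.
--
--   Groups compound identifiers by scaffold, then emits the groups in
--   decreasing order of size by scanning the possible sizes from the
--   largest down to 1 and collecting, for each size, the groups of that
--   size in first-appearance order (a pigeonhole pass instead of a
--   comparison sort; ties come out in the same stable order).
--   """
--   groups = {}
--   for mol_id, datapoint in dataset.items():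
--     groups.setdefault(datapoint["scaffold"], []).append(mol_id)
--   if not groups:
--     return []
--   m = max(len(g) for g in groups.values())
--   out = []
--   for size in range(m, 0, -1):
--     for g in groups.values():
--       if len(g) == size:
--         out.append(g)
--   return out
-- ===== Notes on version B (the rewrite author's own statement) =====
-- stated objective: alternative
-- what changed: B keeps A's scaffold-grouping pass but replaces the stable comparison sort of the groups by a pigeonhole/selection pass: it computes the maximum group size and walks sizes from m down to 1, emitting the groups of each size in first-appearance order, which reproduces the stable descending-by-size order exactly.
import Mathlib
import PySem

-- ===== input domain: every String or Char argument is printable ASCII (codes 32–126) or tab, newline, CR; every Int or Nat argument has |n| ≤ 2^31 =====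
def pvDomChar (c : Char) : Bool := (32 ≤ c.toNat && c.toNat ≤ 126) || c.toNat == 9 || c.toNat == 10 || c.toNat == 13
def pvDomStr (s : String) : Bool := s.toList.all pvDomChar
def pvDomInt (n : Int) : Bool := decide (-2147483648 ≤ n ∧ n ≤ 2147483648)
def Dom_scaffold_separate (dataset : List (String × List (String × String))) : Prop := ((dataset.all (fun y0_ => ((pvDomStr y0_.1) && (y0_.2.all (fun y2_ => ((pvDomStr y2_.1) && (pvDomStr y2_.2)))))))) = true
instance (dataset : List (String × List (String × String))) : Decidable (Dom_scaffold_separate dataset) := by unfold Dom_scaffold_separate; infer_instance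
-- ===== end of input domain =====

-- B replaces A's stable comparison sort of the scaffold groups by a pigeonhole pass over group
-- sizes from the maximum down to 1 (same grouping dict, same output, a different ordering algorithm).

-- ===== PORT A =====
def scaffold_separate (dataset : List (String × List (String × String))) : List (List String) :=
  let scaffolds : PySem.Dict String (List String) :=
    dataset.foldl (fun scaffolds p =>
      let scaffold := ((PySem.Dict.mk p.2).get? "scaffold").getD ""   -- KeyError excluded by Pre_
      if scaffolds.contains scaffold = false then
        scaffolds.insert scaffold [p.1]
      else
        scaffolds.modify scaffold [] (fun g => g ++ [p.1])) PySem.Dict.empty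
  (PySem.List.sorted scaffolds.items (fun x => -(x.2.length : Int))).map (fun x => x.2)

-- ===== PORT B =====
def scaffold_separate_alt (dataset : List (String × List (String × String))) : List (List String) :=
  let groups : PySem.Dict String (List String) :=
    dataset.foldl (fun groups p =>
      groups.modify (((PySem.Dict.mk p.2).get? "scaffold").getD "") [] (fun g => g ++ [p.1]))
      PySem.Dict.empty
  if groups.size = 0 then []
  else
    let m : Nat := ((PySem.List.max? (groups.values.map (fun g => g.length)) (fun x => x)).getD 0)
    (PySem.List.pyRange (m : Int) 0 (-1)).foldl (fun out size =>
      groups.values.foldl (fun out g =>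
        if (g.length : Int) = size then out ++ [g] else out) out) []

-- ===== PRECONDITION & SPEC =====
-- Pre_ excludes exactly the datapoints without a "scaffold" key, on which A raises KeyError.
def Pre_scaffold_separate (dataset : List (String × List (String × String))) : Prop :=
  ∀ p ∈ dataset, (PySem.Dict.mk p.2).contains "scaffold" = true

instance (dataset : List (String × List (String × String))) : Decidable (Pre_scaffold_separate dataset) := by unfold Pre_scaffold_separate; infer_instance

def pvWitness_scaffold_separate : (List (String × List (String × String))) :=
  [("m1", [("scaffold", "s1")]), ("m2", [("scaffold", "s2")]), ("m3", [("scaffold", "s2")])]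

def Spec_scaffold_separate (dataset : List (String × List (String × String))) (out : List (List String)) : Prop := out = scaffold_separate_alt dataset
instance (dataset : List (String × List (String × String))) (out : List (List String)) : Decidable (Spec_scaffold_separate dataset out) := by unfold Spec_scaffold_separate; infer_instance

-- ===== CLAIM (what is proved, stated in full; the proofs are below) =====
def Claim_equal_scaffold_separate : Prop := ∀ (dataset : List (String × List (String × String))), Dom_scaffold_separate dataset → Pre_scaffold_separate dataset → Spec_scaffold_separate dataset (scaffold_separate dataset)

-- ===== LEMMAS AND PROOFS =====

-- The two builds produce the same dict: A's contains-test branch equals B's unconditional modify.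
theorem pv_build_eq (dataset : List (String × List (String × String))) :
    dataset.foldl (fun scaffolds p =>
      let scaffold := ((PySem.Dict.mk p.2).get? "scaffold").getD ""
      if scaffolds.contains scaffold = false then
        scaffolds.insert scaffold [p.1]
      else
        scaffolds.modify scaffold [] (fun g => g ++ [p.1])) PySem.Dict.empty
    = dataset.foldl (fun groups p =>
      groups.modify (((PySem.Dict.mk p.2).get? "scaffold").getD "") [] (fun g => g ++ [p.1]))
      PySem.Dict.empty := by
  apply PySem.List.foldl_congr_mem
  intro acc p _
  set sc := ((PySem.Dict.mk p.2).get? "scaffold").getD "" with hsc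
  by_cases h : acc.contains sc = false
  · simp [h, PySem.Dict.modify, PySem.Dict.getD_of_not_contains acc _ h]
  · simp [h]

-- Every value in the groups dict is a nonempty list.
theorem pv_values_ne_nil (l : List (String × List (String × String)))
    (d : PySem.Dict String (List String)) (h : ∀ v ∈ d.values, v ≠ []) :
    ∀ v ∈ (l.foldl (fun groups p =>
      groups.modify (((PySem.Dict.mk p.2).get? "scaffold").getD "") [] (fun g => g ++ [p.1])) d).values,
      v ≠ [] := by
  induction l generalizing d with
  | nil => exact h
  | cons p t ih =>
    intro v hv
    refine ih _ ?_ v hv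
    intro w hw
    rcases PySem.Dict.mem_values_insert _ _ _ _ hw with h1 | h1
    · subst h1; simp
    · exact h w h1

-- one-step unfolding of PySem.List.insertBy on a cons (definitional)
theorem pv_insertBy_cons {α : Type} (before : α → α → Bool) (x y : α) (ys : List α) :
    PySem.List.insertBy before x (y :: ys)
      = if before x y then x :: y :: ys else y :: PySem.List.insertBy before x ys := rfl

-- insertBy puts x between a prefix of keys ≤ key x and a suffix of strictly larger keys.
theorem pv_insertBy_middle {α : Type} (key : α → Int) (x : α) (P Q : List α)
    (hP : ∀ a ∈ P, ¬ key x < key a) (hQ : ∀ b ∈ Q, key x < key b) :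
    PySem.List.insertBy (fun a b => decide (key a < key b)) x (P ++ Q) = P ++ x :: Q := by
  induction P with
  | nil =>
    cases Q with
    | nil => rfl
    | cons b t => simp [pv_insertBy_cons, hQ b (by simp)]
  | cons a P' ih =>
    have ha : ¬ key x < key a := hP a (by simp)
    rw [List.cons_append, pv_insertBy_cons, if_neg (by simp [ha]),
      ih (fun a ha => hP a (by simp [ha]))]
    simp

-- Stable sort by an Int key = concatenation, over the strictly increasing key values,
-- of the original-order sublists with that key (the bucket decomposition).
theorem pv_sorted_eq_flatMap_filter {α : Type} (key : α → Int) (vs : List Int)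
    (hvs : vs.Pairwise (· < ·)) (l : List α) (hmem : ∀ x ∈ l, key x ∈ vs) :
    PySem.List.sorted l key = vs.flatMap (fun v => l.filter (fun x => decide (key x = v))) := by
  induction l using List.reverseRecOn with
  | nil =>
    rw [PySem.List.sorted_eq_foldl_insertBy]
    induction vs <;> simp_all
  | append_singleton l' x ih =>
    have hkx : key x ∈ vs := hmem x (by simp)
    obtain ⟨vs₁, vs₂, hsplit⟩ := List.append_of_mem hkx
    subst hsplit
    have hp := (List.pairwise_append.mp hvs)
    have hp2 := List.pairwise_cons.mp hp.2.1
    -- vs₁ values < key x; vs₂ values > key x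
    have h1 : ∀ v ∈ vs₁, v < key x := fun v hv => hp.2.2 v hv (key x) (by simp)
    have h2 : ∀ v ∈ vs₂, key x < v := hp2.1
    have hLHS : PySem.List.sorted (l' ++ [x]) key
        = PySem.List.insertBy (fun a b => decide (key a < key b)) x (PySem.List.sorted l' key) := by
      rw [PySem.List.sorted_eq_foldl_insertBy, PySem.List.sorted_eq_foldl_insertBy,
        List.foldl_append]
      rfl
    have ihl : PySem.List.sorted l' key
        = (vs₁ ++ key x :: vs₂).flatMap (fun v => l'.filter (fun x => decide (key x = v))) :=
      ih (fun y hy => hmem y (by simp [hy]))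
    rw [hLHS, ihl]
    have hre : (vs₁ ++ key x :: vs₂).flatMap (fun v => l'.filter (fun x => decide (key x = v)))
        = (vs₁.flatMap (fun v => l'.filter (fun x => decide (key x = v)))
            ++ l'.filter (fun y => decide (key y = key x)))
          ++ vs₂.flatMap (fun v => l'.filter (fun x => decide (key x = v))) := by
      simp [List.flatMap_append]
    rw [hre, pv_insertBy_middle key x _ _ ?hP ?hQ]
    case hP =>
      intro a ha
      rcases List.mem_append.mp ha with ha | ha
      · obtain ⟨v, hv, hav⟩ := List.mem_flatMap.mp ha
        have : key a = v := of_decide_eq_true (List.mem_filter.mp hav).2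
        have := h1 v hv
        omega
      · have : key a = key x := of_decide_eq_true (List.mem_filter.mp ha).2
        omega
    case hQ =>
      intro b hb
      obtain ⟨v, hv, hbv⟩ := List.mem_flatMap.mp hb
      have : key b = v := of_decide_eq_true (List.mem_filter.mp hbv).2
      have := h2 v hv
      omega
    -- now compare with the buckets of l' ++ [x]
    have hbfilter : ∀ v : Int, (l' ++ [x]).filter (fun y => decide (key y = v))
        = l'.filter (fun y => decide (key y = v)) ++ if key x = v then [x] else [] := by
      intro v
      simp [List.filter_append]
      split_ifs with h <;> simp [h]
    have hb1 : ∀ vl : List Int, (∀ v ∈ vl, v ≠ key x) →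
        vl.flatMap (fun v => (l' ++ [x]).filter (fun y => decide (key y = v)))
        = vl.flatMap (fun v => l'.filter (fun y => decide (key y = v))) := by
      intro vl hvl
      apply List.flatMap_congr   -- may not exist; fallback below
      intro v hv
      rw [hbfilter v]
      have : key x ≠ v := fun h => hvl v hv h.symm
      simp [this]
    rw [List.flatMap_append]
    simp only [List.flatMap_cons]
    rw [hb1 vs₁ (fun v hv => ne_of_lt (h1 v hv)),
        hb1 vs₂ (fun v hv => (ne_of_gt (h2 v hv))),
        hbfilter (key x)]
    simp

-- The pigeonhole pass over sizes m..1 equals the stable sort by -len, for a dict with nonempty values.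
theorem pv_main (G : PySem.Dict String (List String))
    (hnn : ∀ v ∈ G.values, v ≠ []) (hsz : ¬ G.size = 0) :
    (PySem.List.sorted G.items (fun x => -(x.2.length : Int))).map (fun x => x.2)
    = (PySem.List.pyRange (((PySem.List.max? (G.values.map (fun g => g.length)) (fun x => x)).getD 0 : Nat) : Int) 0 (-1)).foldl
        (fun out size => G.values.foldl (fun out g =>
          if (g.length : Int) = size then out ++ [g] else out) out) [] := by
  -- name the maximum size m
  obtain ⟨m0, hm0⟩ : ∃ m0, PySem.List.max? (G.values.map (fun g => g.length)) (fun x => x) = some m0 := by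
    cases h : PySem.List.max? (G.values.map (fun g => g.length)) (fun x => x) with
    | none =>
      rw [PySem.List.max?_eq_none_iff] at h
      exact absurd (by simpa [PySem.Dict.size, PySem.Dict.values] using h) hsz
    | some m0 => exact ⟨m0, rfl⟩
  rw [hm0]
  have hmax : ∀ g ∈ G.values, g.length ≤ m0 := fun g hg =>
    PySem.List.max?_isMax hm0 g.length (List.mem_map_of_mem hg)
  -- rewrite B into a flatMap of filters over the descending sizes
  have hB : (PySem.List.pyRange ((some m0).getD 0 : Nat) 0 (-1)).foldl
        (fun out size => G.values.foldl (fun out g =>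
          if (g.length : Int) = size then out ++ [g] else out) out) []
      = (PySem.List.pyRange (m0 : Int) 0 (-1)).flatMap
          (fun s => G.values.filter (fun g => decide ((g.length : Int) = s))) := by
    simp only [Option.getD_some,
      PySem.List.foldl_append_ite_eq_filter (fun g => ((g : List String).length : Int) = _)]
    rw [PySem.List.foldl_append_eq_flatMap]
    simp
  rw [hB]
  -- rewrite A into a flatMap of filters over the ascending keys
  have hvs : ((PySem.List.pyRange (m0 : Int) 0 (-1)).map (fun s => -s)).Pairwise (· < ·) := by
    rw [PySem.List.pyRange_neg_one_eq_reverse, List.map_reverse, List.pairwise_reverse,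
      List.pairwise_map]
    exact (PySem.List.pairwise_lt_pyRange_one (0 + 1) ((m0 : Int) + 1)).imp (by intro a b h; omega)
  have hmem : ∀ p ∈ G.items, (fun x => -((x.2 : List String).length : Int)) p
      ∈ (PySem.List.pyRange (m0 : Int) 0 (-1)).map (fun s => -s) := by
    intro p hp
    have hv : p.2 ∈ G.values := List.mem_map_of_mem hp
    have h1 : 0 < p.2.length := List.length_pos_iff.mpr (hnn p.2 hv)
    have h2 : p.2.length ≤ m0 := hmax p.2 hv
    refine List.mem_map.mpr ⟨(p.2.length : Int), ?_, rfl⟩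
    rw [PySem.List.mem_pyRange_neg_one]
    omega
  rw [pv_sorted_eq_flatMap_filter _ _ hvs _ hmem, List.map_flatMap, List.flatMap_map]
  apply List.flatMap_congr
  intro s _
  have : (fun p : String × List String => decide (-(p.2.length : Int) = -s))
      = (fun g : List String => decide ((g.length : Int) = s)) ∘ (fun p => p.2) := by
    funext p; simp
  rw [this, ← List.filter_map]
  rfl

-- ===== VERDICT (by name: the statement is the Claim_ definition above) =====
theorem scaffold_separate_spec : Claim_equal_scaffold_separate := by
  intro dataset _ hpre
  unfold Spec_scaffold_separate scaffold_separate scaffold_separate_alt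
  rw [pv_build_eq]
  set G := dataset.foldl (fun groups p =>
      groups.modify (((PySem.Dict.mk p.2).get? "scaffold").getD "") [] (fun g => g ++ [p.1]))
      PySem.Dict.empty with hG
  by_cases hsz : G.size = 0
  · have hit : G.items = [] := List.length_eq_zero_iff.mp hsz
    rw [if_pos hsz]
    show (PySem.List.sorted G.items (fun x => -(x.2.length : Int))).map (fun x => x.2) = []
    rw [hit, PySem.List.sorted_eq_foldl_insertBy]
    simp
  · rw [if_neg hsz]
    show (PySem.List.sorted G.items (fun x => -(x.2.length : Int))).map (fun x => x.2) = _
    exact pv_main G (pv_values_ne_nil dataset PySem.Dict.empty (by simp [PySem.Dict.values, PySem.Dict.empty])) hsz
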